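-- pv_equiv track=rewrite | github.com/gaudiatech/sdkTesting | tag009/niobe-essai.py | conv_map_coords_floorgrid
-- ===== SOURCE A (Python) =====
-- def conv_map_coords_floorgrid(u, v, z):
--     base_res = [4, 0]  # mapcoords 0,0
--     while u > 0:
--         u -= 1
--         base_res[0] += 1
--         base_res[1] += 1
--     while v > 0:
--         v -= 1
--         base_res[0] -= 1
--         base_res[1] += 1
--     while z > 0:
--         z -= 1
--         base_res[1] -= 1
--     return base_res
-- ===== SOURCE B (Python) =====
-- def conv_map_coords_floorgrid(u, v, z):
--     up = max(u, 0)
--     vp = max(v, 0)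
--     zp = max(z, 0)
--     return [4 + up - vp, up + vp - zp]
-- ===== Notes on version B (the rewrite author's own statement) =====
-- stated objective: faster
-- what changed: Replaces the three unit-decrement loops with a closed-form arithmetic expression using max(.,0).
import Mathlib
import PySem

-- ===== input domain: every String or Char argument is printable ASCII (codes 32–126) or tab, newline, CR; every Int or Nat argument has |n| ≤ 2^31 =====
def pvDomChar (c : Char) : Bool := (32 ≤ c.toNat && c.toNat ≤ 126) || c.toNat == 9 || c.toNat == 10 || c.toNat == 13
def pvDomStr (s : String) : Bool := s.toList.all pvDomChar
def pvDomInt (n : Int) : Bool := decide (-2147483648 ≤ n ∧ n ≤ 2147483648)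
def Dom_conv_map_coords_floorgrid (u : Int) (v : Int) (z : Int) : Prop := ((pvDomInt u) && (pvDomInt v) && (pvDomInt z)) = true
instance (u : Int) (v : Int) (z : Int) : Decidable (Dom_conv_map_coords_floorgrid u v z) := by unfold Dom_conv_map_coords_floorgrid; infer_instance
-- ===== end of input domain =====

-- B replaces A's three unit-decrement loops with a closed-form max-based expression (O(1) vs O(u+v+z)).


-- ===== PORT A =====
-- while u > 0: u -= 1; base_res[0] += 1; base_res[1] += 1
def pvLoopU (u r0 r1 : Int) : Int × Int :=
  if 0 < u then pvLoopU (u - 1) (r0 + 1) (r1 + 1) else (r0, r1)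
termination_by u.toNat
decreasing_by omega

-- while v > 0: v -= 1; base_res[0] -= 1; base_res[1] += 1
def pvLoopV (v r0 r1 : Int) : Int × Int :=
  if 0 < v then pvLoopV (v - 1) (r0 - 1) (r1 + 1) else (r0, r1)
termination_by v.toNat
decreasing_by omega

-- while z > 0: z -= 1; base_res[1] -= 1
def pvLoopZ (z r1 : Int) : Int :=
  if 0 < z then pvLoopZ (z - 1) (r1 - 1) else r1
termination_by z.toNat
decreasing_by omega

def conv_map_coords_floorgrid (u : Int) (v : Int) (z : Int) : List Int :=
  let s1 := pvLoopU u 4 0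
  let s2 := pvLoopV v s1.1 s1.2
  let r1 := pvLoopZ z s2.2
  [s2.1, r1]

-- ===== PORT B =====
def conv_map_coords_floorgrid_alt (u : Int) (v : Int) (z : Int) : List Int :=
  let up := max u 0
  let vp := max v 0
  let zp := max z 0
  [4 + up - vp, up + vp - zp]

-- ===== PRECONDITION & SPEC =====
def Spec_conv_map_coords_floorgrid (u : Int) (v : Int) (z : Int) (out : List Int) : Prop := out = conv_map_coords_floorgrid_alt u v z
instance (u : Int) (v : Int) (z : Int) (out : List Int) : Decidable (Spec_conv_map_coords_floorgrid u v z out) := by unfold Spec_conv_map_coords_floorgrid; infer_instance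

-- ===== CLAIM (what is proved, stated in full; the proofs are below) =====
def Claim_equal_conv_map_coords_floorgrid : Prop := ∀ (u : Int) (v : Int) (z : Int), Dom_conv_map_coords_floorgrid u v z → Spec_conv_map_coords_floorgrid u v z (conv_map_coords_floorgrid u v z)

-- ===== LEMMAS AND PROOFS =====
theorem pvLoopU_eq (u r0 r1 : Int) : pvLoopU u r0 r1 = (r0 + max u 0, r1 + max u 0) := by
  rw [pvLoopU]
  split
  · rw [pvLoopU_eq (u - 1)]
    refine Prod.ext ?_ ?_ <;> simp <;> omega
  · simp; omega
termination_by u.toNat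
decreasing_by omega

theorem pvLoopV_eq (v r0 r1 : Int) : pvLoopV v r0 r1 = (r0 - max v 0, r1 + max v 0) := by
  rw [pvLoopV]
  split
  · rw [pvLoopV_eq (v - 1)]
    refine Prod.ext ?_ ?_ <;> simp <;> omega
  · simp; omega
termination_by v.toNat
decreasing_by omega

theorem pvLoopZ_eq (z r1 : Int) : pvLoopZ z r1 = r1 - max z 0 := by
  rw [pvLoopZ]
  split
  · rw [pvLoopZ_eq (z - 1)]
    omega
  · omega
termination_by z.toNat
decreasing_by omega

-- ===== VERDICT (by name: the statement is the Claim_ definition above) =====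
theorem conv_map_coords_floorgrid_spec : Claim_equal_conv_map_coords_floorgrid := by
  intro u v z _
  unfold Spec_conv_map_coords_floorgrid conv_map_coords_floorgrid conv_map_coords_floorgrid_alt
  simp [pvLoopU_eq, pvLoopV_eq, pvLoopZ_eq]
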